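-- pv_equiv track=rewrite | github.com/fallingbody/CPU-and-Disk-Scheduling | cpu_disk_sch.py | _get_gantt_text
-- ===== SOURCE A (Python) =====
-- def _get_gantt_text(gantt_chart):
--     if not gantt_chart:
--         return "", 0
--
--     # Step 1: Merge contiguous blocks (e.g., [("P1", 1), ("P1", 1)] -> [("P1", 2)])
--     # This is crucial for SRTF and RR to look clean.
--     merged_chart = []
--     last_pid = gantt_chart[0][0]
--     current_duration = 0
--     for pid, duration in gantt_chart:
--         if pid == last_pid:
--             current_duration += duration
--         else:
--             merged_chart.append((last_pid, current_duration))
--             last_pid = pid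
--             current_duration = duration
--     merged_chart.append((last_pid, current_duration)) # Add the final block
--
--     # Step 2: Build the text chart and count switches
--     line = "|"
--     time_line = "0"
--     current_time = 0
--     switches = 0
--     last_pid = None # Tracks the last *process* that was running
--
--     for item, duration in merged_chart:
--         # Create the bar text (e.g., "---P1---")
--         bar_content = f"{item}"
--         bar_len = max(len(bar_content) + 2, len(str(duration)) + 2)
--         bar = f"{item}".center(bar_len, "-")
--
--         line += bar + "|"
--         current_time += duration
--         time_str = str(current_time)
--
--         # Add padding to align the time stamp under the "|"
--         padding = len(line) - len(time_line) - (len(time_str))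
--         if padding < 0:
--             padding = 0
--
--         time_line += " " * padding + time_str
--
--         # --- Context Switch Logic ---
--         if item == "Idle":
--             last_pid = "Idle" # Reset on Idle
--             continue
--
--         # If this is the first process, set last_pid and don't count a switch
--         if last_pid is None or last_pid == "Idle":
--             last_pid = item
--             continue
--
--         # If the new item is different from the last *process*, count a switch
--         if item != last_pid:
--             switches += 1
--
--         last_pid = item # Update the last running process
--
--     return line + "\n" + time_line, switches
-- ===== SOURCE B (Python) =====
-- def _get_gantt_text(gantt_chart):
--     # Single pass: buffer the current (pid, duration) block and flush it when the
--     # pid changes; switches = adjacent flushed pairs where both pids are non-"Idle".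
--     if not gantt_chart:
--         return "", 0
--
--     line = "|"
--     time_line = "0"
--     current_time = 0
--     switches = 0
--     prev_pid = None  # pid of the previously flushed block
--
--     def flush(pid, dur):
--         nonlocal line, time_line, current_time, switches, prev_pid
--         width = max(len(pid) + 2, len(str(dur)) + 2)
--         line += pid.center(width, "-") + "|"
--         current_time += dur
--         ts = str(current_time)
--         pad = max(len(line) - len(time_line) - len(ts), 0)
--         time_line += " " * pad + ts
--         if prev_pid is not None and prev_pid != "Idle" and pid != "Idle":
--             switches += 1
--         prev_pid = pid
--
--     cur_pid, cur_dur = gantt_chart[0][0], 0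
--     for pid, duration in gantt_chart:
--         if pid == cur_pid:
--             cur_dur += duration
--         else:
--             flush(cur_pid, cur_dur)
--             cur_pid, cur_dur = pid, duration
--     flush(cur_pid, cur_dur)
--     return line + "\n" + time_line, switches
-- ===== Notes on version B (the rewrite author's own statement) =====
-- stated objective: simpler
-- what changed: B replaces A's two passes (pre-build a merged_chart list, then loop over it with a last_pid/Idle-reset state machine) by one buffered pass over gantt_chart that flushes a (pid, duration) block when the pid changes, counting a context switch exactly when two consecutively flushed blocks are both non-'Idle'.
import Mathlib
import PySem

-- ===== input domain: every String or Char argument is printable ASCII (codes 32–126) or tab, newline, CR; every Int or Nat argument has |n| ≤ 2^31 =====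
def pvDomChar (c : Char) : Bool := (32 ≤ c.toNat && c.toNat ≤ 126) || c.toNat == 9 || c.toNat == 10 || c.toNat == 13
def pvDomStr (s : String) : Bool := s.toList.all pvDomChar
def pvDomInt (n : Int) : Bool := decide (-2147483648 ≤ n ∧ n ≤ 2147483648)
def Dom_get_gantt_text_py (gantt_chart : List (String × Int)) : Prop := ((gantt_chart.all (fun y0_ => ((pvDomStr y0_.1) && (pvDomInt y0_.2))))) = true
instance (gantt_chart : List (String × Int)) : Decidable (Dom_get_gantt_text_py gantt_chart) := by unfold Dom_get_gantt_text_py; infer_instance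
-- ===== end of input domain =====

-- B fuses A's two passes into one buffered pass and counts switches as adjacent
-- non-'Idle' flushed blocks (objective: simpler, same cost).

-- shared helper: Python's s.center(w, '-') (CPython: left margin = marg//2 + (marg & w & 1));
-- exact for w > len(s) ≥ 0 (the only reachable case here; otherwise Python returns s, as we do)
def pvCenterDash (s : String) (w : Int) : String :=
  let cs := s.toList
  let marg : Int := w - cs.length
  if marg ≤ 0 then s
  else
    let m : Nat := marg.toNat
    let left : Nat := m / 2 + (m &&& w.toNat &&& 1)
    String.ofList (List.replicate left '-' ++ cs ++ List.replicate (m - left) '-')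

-- the state of the chart-building loop: line, time_line, current_time, switches, last_pid
structure PvSt where
  line : String
  tl : String
  ct : Int
  sw : Int
  last : Option String
deriving Repr, DecidableEq

-- ===== PORT A =====
-- A's step-1 merge fold: state (merged_chart, last_pid, current_duration)
def pvMergeStep (st : List (String × Int) × String × Int) (b : String × Int) :
    List (String × Int) × String × Int :=
  if b.1 == st.2.1 then (st.1, st.2.1, st.2.2 + b.2)
  else (st.1 ++ [(st.2.1, st.2.2)], b.1, b.2)

-- A's step-2 loop body (bar text, time line, then A's last_pid/Idle context-switch logic)
def pvAStep (st : PvSt) (b : String × Int) : PvSt :=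
  let item := b.1
  let duration := b.2
  let bar_len : Int := max (PySem.Str.len item + 2) (PySem.Str.len (PySem.Int.toStr duration) + 2)
  let bar := pvCenterDash item bar_len
  let line := st.line ++ bar ++ "|"
  let ct := st.ct + duration
  let ts := PySem.Int.toStr ct
  let padding : Int := PySem.Str.len line - PySem.Str.len st.tl - PySem.Str.len ts
  let padding := if padding < 0 then 0 else padding
  -- " " * padding, padding ≥ 0 here: exact
  let tl := st.tl ++ String.ofList (List.replicate padding.toNat ' ') ++ ts
  if item == "Idle" then ⟨line, tl, ct, st.sw, some "Idle"⟩
  else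
    match st.last with
    | none => ⟨line, tl, ct, st.sw, some item⟩
    | some l =>
      if l == "Idle" then ⟨line, tl, ct, st.sw, some item⟩
      else if item != l then ⟨line, tl, ct, st.sw + 1, some item⟩
      else ⟨line, tl, ct, st.sw, some item⟩

def get_gantt_text_py (gantt_chart : List (String × Int)) : String × Int :=
  match gantt_chart with
  | [] => ("", 0)
  | (p0, _) :: _ =>
    let m := gantt_chart.foldl pvMergeStep ([], p0, 0)
    let merged_chart := m.1 ++ [(m.2.1, m.2.2)]
    let f := merged_chart.foldl pvAStep ⟨"|", "0", 0, 0, none⟩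
    (f.line ++ "\n" ++ f.tl, f.sw)

-- ===== PORT B =====
-- B's flush: emit the buffered block; count a switch iff the previously flushed
-- block and this one are both non-"Idle"
def pvFlush (st : PvSt) (pid : String) (dur : Int) : PvSt :=
  let width : Int := max (PySem.Str.len pid + 2) (PySem.Str.len (PySem.Int.toStr dur) + 2)
  let line := st.line ++ pvCenterDash pid width ++ "|"
  let ct := st.ct + dur
  let ts := PySem.Int.toStr ct
  let pad : Int := max (PySem.Str.len line - PySem.Str.len st.tl - PySem.Str.len ts) 0
  let tl := st.tl ++ String.ofList (List.replicate pad.toNat ' ') ++ ts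
  let sw :=
    match st.last with
    | some p => if p != "Idle" && pid != "Idle" then st.sw + 1 else st.sw
    | none => st.sw
  ⟨line, tl, ct, sw, some pid⟩

-- B's single-pass loop body: state (text state, cur_pid, cur_dur)
def pvBStep (st : PvSt × String × Int) (b : String × Int) : PvSt × String × Int :=
  if b.1 == st.2.1 then (st.1, st.2.1, st.2.2 + b.2)
  else (pvFlush st.1 st.2.1 st.2.2, b.1, b.2)

def get_gantt_text_py_alt (gantt_chart : List (String × Int)) : String × Int :=
  match gantt_chart with
  | [] => ("", 0)
  | (p0, _) :: _ =>
    let r := gantt_chart.foldl pvBStep (⟨"|", "0", 0, 0, none⟩, p0, 0)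
    let f := pvFlush r.1 r.2.1 r.2.2
    (f.line ++ "\n" ++ f.tl, f.sw)

-- ===== PRECONDITION & SPEC =====
def Spec_get_gantt_text_py (gantt_chart : List (String × Int)) (out : String × Int) : Prop := out = get_gantt_text_py_alt gantt_chart
instance (gantt_chart : List (String × Int)) (out : String × Int) : Decidable (Spec_get_gantt_text_py gantt_chart out) := by unfold Spec_get_gantt_text_py; infer_instance

-- ===== CLAIM (what is proved, stated in full; the proofs are below) =====
def Claim_equal_get_gantt_text_py : Prop := ∀ (gantt_chart : List (String × Int)), Dom_get_gantt_text_py gantt_chart → Spec_get_gantt_text_py gantt_chart (get_gantt_text_py gantt_chart)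

-- ===== LEMMAS AND PROOFS =====

-- the merged chart, written as a recursion (proof-side restatement of A's step 1)
def pvMRest : List (String × Int) → String → Int → List (String × Int)
  | [], lp, cd => [(lp, cd)]
  | (p, d) :: t, lp, cd => if p == lp then pvMRest t lp (cd + d) else (lp, cd) :: pvMRest t p d

theorem pvMerge_eq (l : List (String × Int)) :
    ∀ (acc : List (String × Int)) (lp : String) (cd : Int),
    (l.foldl pvMergeStep (acc, lp, cd)).1 ++
      [((l.foldl pvMergeStep (acc, lp, cd)).2.1, (l.foldl pvMergeStep (acc, lp, cd)).2.2)]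
    = acc ++ pvMRest l lp cd := by
  induction l with
  | nil => intro acc lp cd; simp [pvMRest]
  | cons b t ih =>
    intro acc lp cd
    obtain ⟨p, d⟩ := b
    simp only [List.foldl_cons, pvMergeStep, pvMRest]
    by_cases h : p = lp
    · simp [h, ih]
    · simp [h, ih, List.append_assoc]

theorem pvFlush_eq_astep (st : PvSt) (lp : String) (cd : Int)
    (h : ∀ p, st.last = some p → p ≠ lp) :
    pvFlush st lp cd = pvAStep st (lp, cd) := by
  unfold pvFlush pvAStep
  have hmax : ∀ a : Int, max a 0 = if a < 0 then 0 else a := fun a => by omega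
  simp only [hmax]
  cases hl : st.last with
  | none =>
    by_cases hI : lp = "Idle" <;> simp [hI]
  | some p =>
    have hne : p ≠ lp := h p hl
    by_cases hI : lp = "Idle" <;> by_cases hpI : p = "Idle" <;>
      simp [hI, hpI, bne, Ne.symm hne]

theorem pvMain (l : List (String × Int)) :
    ∀ (st : PvSt) (lp : String) (cd : Int), (∀ p, st.last = some p → p ≠ lp) →
    pvFlush (l.foldl pvBStep (st, lp, cd)).1 (l.foldl pvBStep (st, lp, cd)).2.1
        (l.foldl pvBStep (st, lp, cd)).2.2
      = (pvMRest l lp cd).foldl pvAStep st := by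
  induction l with
  | nil =>
    intro st lp cd h
    simpa [pvMRest] using pvFlush_eq_astep st lp cd h
  | cons b t ih =>
    intro st lp cd h
    obtain ⟨p, d⟩ := b
    simp only [List.foldl_cons, pvBStep, pvMRest]
    by_cases hp : p = lp
    · simp only [hp, beq_self_eq_true, if_true]
      exact ih st lp (cd + d) h
    · simp only [hp, not_false_eq_true, if_neg, beq_iff_eq]
      have h' : ∀ q, (pvFlush st lp cd).last = some q → q ≠ p := by
        intro q hq
        simp [pvFlush] at hq
        subst hq
        exact fun e => hp e.symm
      rw [ih (pvFlush st lp cd) p d h', pvFlush_eq_astep st lp cd h, List.foldl_cons]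

-- ===== VERDICT (by name: the statement is the Claim_ definition above) =====
theorem get_gantt_text_py_spec : Claim_equal_get_gantt_text_py := by
  unfold Claim_equal_get_gantt_text_py
  intro gc _
  unfold Spec_get_gantt_text_py
  match gc with
  | [] => rfl
  | (p0, d0) :: t =>
    simp only [get_gantt_text_py, get_gantt_text_py_alt]
    rw [show (((p0, d0) :: t).foldl pvMergeStep ([], p0, 0)).1 ++
        [((((p0, d0) :: t).foldl pvMergeStep ([], p0, 0)).2.1,
          (((p0, d0) :: t).foldl pvMergeStep ([], p0, 0)).2.2)]
        = pvMRest ((p0, d0) :: t) p0 0 from pvMerge_eq _ [] p0 0]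
    rw [← pvMain ((p0, d0) :: t) ⟨"|", "0", 0, 0, none⟩ p0 0 (by intro p hp; cases hp)]
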